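-- pv_equiv track=rewrite | github.com/ChiefsBestPal/Skyscrapper-puzzles | PersoSkyscrapper.py | getCellIxFromClueIx
-- ===== SOURCE A (Python) =====
-- class helper():
--     pass
--
-- def getCellIxFromRowIx(rowIx,N) -> helper():
--     """retuns an array of all cells
--     indices from row index
--     >>> getCellIxFromRowIx(2,4)
--         iter(8,9,10,11)
--     """
--     firstCellOfRow = rowIx * N
--     return [cellIx for cellIx in range(firstCellOfRow, firstCellOfRow + N)]
--
-- def getCellIxFromColIx(colIx,N) -> helper():
--     """returns an array of all cells
--     indices from col index
--     >>> getCellIxFromColIx(0,4)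
--         iter(0,4,8,12)
--     """
--     firstCellOfCol = colIx
--     return [firstCellOfCol + i * N for i in range(N)]
--
-- def getCellIxFromClueIx(clueIx,N) -> helper():
--     """returns an array of all cells
--     indices from value index (from leftupmost cell, 0 to 15 going clockwise)
--     >>> warning: CellIx and ClueIx are different in their disposition !!!
--     >>> getCellIxFromClueIx()
--     """
--     for i in range(1,N+1):#1 to 4, 4 edges
--         relativePosClue = clueIx % N
--         if clueIx < N*i:
--             if i == 1:#top edge
--                 return getCellIxFromColIx(relativePosClue,N)
--             elif i == 2:#right edge
--                 return getCellIxFromRowIx(relativePosClue, N)[::-1]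
--             elif i == 3:#bottom edge
--                 return getCellIxFromColIx(abs(relativePosClue - (N - 1)), N)[::-1] #relative position in relation to the down right corner...
--             else: #left edge
--                 return getCellIxFromRowIx(abs(relativePosClue- (N - 1)), N) # '' '' to the down left corner
-- ===== SOURCE B (Python) =====
-- def getCellIxFromClueIx(clueIx, N):
--     # table-driven: each edge's line is an arithmetic progression start + k*step
--     pos = clueIx % N
--     e = max(0, min(3, clueIx // N))
--     start, step = (
--         (pos, N),                          # top edge: down the column
--         (pos * N + N - 1, -1),             # right edge: row right-to-left
--         ((N - 1) * N + (N - 1 - pos), -N), # bottom edge: up the column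
--         ((N - 1 - pos) * N, 1),            # left edge: row left-to-right
--     )[e]
--     return [start + k * step for k in range(N)]
-- ===== Notes on version B (the rewrite author's own statement) =====
-- stated objective: simpler
-- what changed: Replaces the edge-search loop over range(1,N+1) with its row/col helper calls and [::-1] reversals by a table lookup (edge = clamped clueIx//N selects a (start,step) pair) and one arithmetic-progression comprehension shared by all four edges.
-- outside the precondition, e.g. on getCellIxFromClueIx(16, 4): A returns None, B returns [12, 13, 14, 15]; on getCellIxFromClueIx(0, 0): A returns None, B raises ZeroDivisionError
import Mathlib
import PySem

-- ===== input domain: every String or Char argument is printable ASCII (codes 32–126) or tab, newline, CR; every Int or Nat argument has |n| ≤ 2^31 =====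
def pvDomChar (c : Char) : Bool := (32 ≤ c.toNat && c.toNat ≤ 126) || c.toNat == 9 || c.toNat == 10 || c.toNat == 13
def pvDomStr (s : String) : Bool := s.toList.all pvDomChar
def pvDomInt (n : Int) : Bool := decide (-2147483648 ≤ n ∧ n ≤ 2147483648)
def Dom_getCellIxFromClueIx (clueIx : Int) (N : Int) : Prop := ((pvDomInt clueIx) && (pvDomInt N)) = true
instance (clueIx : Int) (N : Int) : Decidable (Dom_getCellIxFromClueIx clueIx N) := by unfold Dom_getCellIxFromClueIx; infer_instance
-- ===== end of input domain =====

-- B replaces A's edge-search loop, row/col helpers and [::-1] reversals by one table lookup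
-- (edge = clamped clueIx // N → (start, step)) and a single arithmetic-progression
-- comprehension (objective: simpler); same return values on Pre_.

-- ===== PORT A =====
def getCellIxFromRowIx (rowIx : Int) (N : Int) : List Int :=
  let firstCellOfRow := rowIx * N
  (PySem.List.pyRange firstCellOfRow (firstCellOfRow + N) 1).map (fun cellIx => cellIx)

def getCellIxFromColIx (colIx : Int) (N : Int) : List Int :=
  let firstCellOfCol := colIx
  (PySem.List.pyRange 0 N 1).map (fun i => firstCellOfCol + i * N)

-- Python's abs on Int
def pyAbsA (x : Int) : Int := if x < 0 then -x else x

-- the 'for i in range(1,N+1)' loop with its early returns; [] stands for Python's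
-- fall-off-the-loop 'return None' (excluded by Pre_)
def getCellIxLoopA (clueIx : Int) (N : Int) : List Int → List Int
  | [] => []
  | i :: rest =>
    let relativePosClue := PySem.Int.mod clueIx N
    if clueIx < N * i then
      if i = 1 then getCellIxFromColIx relativePosClue N
      else if i = 2 then (PySem.List.slice? (getCellIxFromRowIx relativePosClue N) none none (-1)).getD []
      else if i = 3 then (PySem.List.slice? (getCellIxFromColIx (pyAbsA (relativePosClue - (N - 1))) N) none none (-1)).getD []
      else getCellIxFromRowIx (pyAbsA (relativePosClue - (N - 1))) N
    else getCellIxLoopA clueIx N rest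

def getCellIxFromClueIx (clueIx : Int) (N : Int) : List Int :=
  getCellIxLoopA clueIx N (PySem.List.pyRange 1 (N + 1) 1)

-- ===== PORT B =====
def getCellIxFromClueIx_alt (clueIx : Int) (N : Int) : List Int :=
  let pos := PySem.Int.mod clueIx N
  let e := max 0 (min 3 (PySem.Int.floordiv clueIx N))
  -- the 4-tuple table indexed by e (e is always in range, so getD is never reached)
  let p := (PySem.List.pyGet? [(pos, N), (pos * N + N - 1, -1),
                               ((N - 1) * N + (N - 1 - pos), -N),
                               ((N - 1 - pos) * N, 1)] e).getD (0, 0)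
  (PySem.List.pyRange 0 N 1).map (fun k => p.1 + k * p.2)

-- ===== PRECONDITION & SPEC =====
-- Pre_ excludes N ≤ 0 and clueIx ≥ N*N: there A's loop falls through (or never runs) and
-- returns None, which is not a list; B returns a left-edge list (or raises on N = 0) there.
def Pre_getCellIxFromClueIx (clueIx : Int) (N : Int) : Prop := 1 ≤ N ∧ clueIx < N * N
instance (clueIx : Int) (N : Int) : Decidable (Pre_getCellIxFromClueIx clueIx N) := by unfold Pre_getCellIxFromClueIx; infer_instance
def pvWitness_getCellIxFromClueIx : Int × Int := (5, 4)

def Spec_getCellIxFromClueIx (clueIx : Int) (N : Int) (out : List Int) : Prop := out = getCellIxFromClueIx_alt clueIx N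
instance (clueIx : Int) (N : Int) (out : List Int) : Decidable (Spec_getCellIxFromClueIx clueIx N out) := by unfold Spec_getCellIxFromClueIx; infer_instance

-- ===== CLAIM (what is proved, stated in full; the proofs are below) =====
def Claim_equal_getCellIxFromClueIx : Prop := ∀ (clueIx : Int) (N : Int), Dom_getCellIxFromClueIx clueIx N → Pre_getCellIxFromClueIx clueIx N → Spec_getCellIxFromClueIx clueIx N (getCellIxFromClueIx clueIx N)

-- ===== LEMMAS AND PROOFS =====

theorem pv_witness_ok : Dom_getCellIxFromClueIx pvWitness_getCellIxFromClueIx.1 pvWitness_getCellIxFromClueIx.2 ∧ Pre_getCellIxFromClueIx pvWitness_getCellIxFromClueIx.1 pvWitness_getCellIxFromClueIx.2 := by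
  constructor <;> decide

theorem pyRange_shift (a N : Int) : PySem.List.pyRange a (a + N) 1 = (PySem.List.pyRange 0 N 1).map (fun k => a + k) := by
  rw [PySem.List.pyRange_one, PySem.List.pyRange_one, List.map_map]
  have : a + N - a = N - 0 := by ring
  rw [this]
  simp [Function.comp]

theorem rev_map_pyRange (N : Int) (f g : Int → Int)
    (h : ∀ x : Int, 0 ≤ x → x < N → g x = f (N - 1 - x)) :
    ((PySem.List.pyRange 0 N 1).map f).reverse = (PySem.List.pyRange 0 N 1).map g := by
  apply List.ext_getElem
  · simp
  · intro i h1 h2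
    simp only [List.length_map, PySem.List.length_pyRange_one] at h1 h2
    rw [List.getElem_reverse, List.getElem_map, List.getElem_map,
        PySem.List.getElem_pyRange_one, PySem.List.getElem_pyRange_one]
    rw [h]
    · congr 1
      simp only [List.length_map, PySem.List.length_pyRange_one]
      omega
    · omega
    · omega

-- the loop from i = j onwards (all j ≥ 4) ends in the left-edge branch
theorem loopLeft (clueIx N : Int) : ∀ (n : Nat) (j : Int), 4 ≤ j → j ≤ N →
    N * (j - 1) ≤ clueIx → clueIx < N * N → (N - j).toNat = n →
    getCellIxLoopA clueIx N (PySem.List.pyRange j (N + 1) 1) =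
      getCellIxFromRowIx (pyAbsA (PySem.Int.mod clueIx N - (N - 1))) N := by
  intro n
  induction n with
  | zero =>
    intro j h4 hjN hlo hhi hn
    have hj : j = N := by omega
    subst hj
    rw [PySem.List.pyRange_one_cons (by omega), PySem.List.pyRange_one_eq_nil (by omega)]
    simp only [getCellIxLoopA]
    rw [if_pos hhi, if_neg (by omega), if_neg (by omega), if_neg (by omega)]
  | succ n ih =>
    intro j h4 hjN hlo hhi hn
    rw [PySem.List.pyRange_one_cons (by omega)]
    simp only [getCellIxLoopA]
    by_cases hc : clueIx < N * j
    · rw [if_pos hc, if_neg (by omega), if_neg (by omega), if_neg (by omega)]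
    · rw [if_neg hc]
      have hjN' : j + 1 ≤ N := by nlinarith
      have hlo' : N * (j + 1 - 1) ≤ clueIx := by
        have e : N * (j + 1 - 1) = N * j := by ring
        rw [e]; omega
      exact ih (j + 1) (by omega) hjN' hlo' hhi (by omega)

theorem pos_bounds (clueIx N : Int) (hN : 1 ≤ N) :
    0 ≤ PySem.Int.mod clueIx N ∧ PySem.Int.mod clueIx N < N := by
  rw [PySem.Int.mod_eq_emod_of_pos (by omega)]
  exact ⟨Int.emod_nonneg clueIx (by omega), Int.emod_lt_of_pos clueIx (by omega)⟩

-- ===== VERDICT (by name: the statement is the Claim_ definition above) =====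
theorem getCellIxFromClueIx_spec : Claim_equal_getCellIxFromClueIx := by
  intro clueIx N _ hPre
  obtain ⟨hN, hlt⟩ := hPre
  have hN0 : (0:Int) < N := by omega
  obtain ⟨hp0, hpN⟩ := pos_bounds clueIx N hN
  have habs : pyAbsA (PySem.Int.mod clueIx N - (N - 1)) = N - 1 - PySem.Int.mod clueIx N := by
    unfold pyAbsA
    split_ifs with h <;> omega
  simp only [Spec_getCellIxFromClueIx, getCellIxFromClueIx, getCellIxFromClueIx_alt]
  by_cases h1 : clueIx < N
  · -- top edge, i = 1 / e = 0
    have hq : PySem.Int.floordiv clueIx N < 1 :=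
      (PySem.Int.floordiv_lt_iff_lt_mul hN0).mpr (by omega)
    have he : max 0 (min 3 (PySem.Int.floordiv clueIx N)) = 0 := by omega
    rw [he, PySem.List.pyGet?_zero_cons, Option.getD_some]
    rw [PySem.List.pyRange_one_cons (show (1:Int) < N + 1 by omega)]
    simp only [getCellIxLoopA]
    rw [if_pos (show clueIx < N * 1 by omega), if_pos (by trivial)]
    rfl
  · by_cases h2 : clueIx < 2 * N
    · -- right edge, i = 2 / e = 1; here N ≥ 2
      have hN2 : 2 ≤ N := by nlinarith
      have hq : PySem.Int.floordiv clueIx N = 1 :=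
        (PySem.Int.floordiv_eq_iff_of_pos hN0).mpr ⟨by omega, by omega⟩
      have he : max 0 (min 3 (PySem.Int.floordiv clueIx N)) = ((1:Nat):Int) := by push_cast; omega
      rw [he, PySem.List.pyGet?_natCast,
          show ([(PySem.Int.mod clueIx N, N), (PySem.Int.mod clueIx N * N + N - 1, -1),
                ((N - 1) * N + (N - 1 - PySem.Int.mod clueIx N), -N),
                ((N - 1 - PySem.Int.mod clueIx N) * N, 1)] : List (Int × Int))[1]?
            = some (PySem.Int.mod clueIx N * N + N - 1, -1) from rfl, Option.getD_some]
      rw [PySem.List.pyRange_one_cons (show (1:Int) < N + 1 by omega),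
          PySem.List.pyRange_one_cons (show (1:Int) + 1 < N + 1 by omega)]
      simp only [getCellIxLoopA]
      rw [if_neg (show ¬clueIx < N * 1 by omega),
          if_pos (show clueIx < N * (1 + 1) by omega),
          if_neg (show ¬(1:Int) + 1 = 1 by omega), if_pos (by trivial)]
      rw [PySem.List.slice?_none_none_neg_one, Option.getD_some]
      simp only [getCellIxFromRowIx, List.map_id']
      rw [pyRange_shift (PySem.Int.mod clueIx N * N) N]
      exact rev_map_pyRange N _ _ (by intro x hx0 hxN; ring)
    · by_cases h3 : clueIx < 3 * N
      · -- bottom edge, i = 3 / e = 2; here N ≥ 3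
        have hN3 : 3 ≤ N := by nlinarith
        have hq : PySem.Int.floordiv clueIx N = 2 :=
          (PySem.Int.floordiv_eq_iff_of_pos hN0).mpr ⟨by omega, by omega⟩
        have he : max 0 (min 3 (PySem.Int.floordiv clueIx N)) = ((2:Nat):Int) := by push_cast; omega
        rw [he, PySem.List.pyGet?_natCast,
            show ([(PySem.Int.mod clueIx N, N), (PySem.Int.mod clueIx N * N + N - 1, -1),
                  ((N - 1) * N + (N - 1 - PySem.Int.mod clueIx N), -N),
                  ((N - 1 - PySem.Int.mod clueIx N) * N, 1)] : List (Int × Int))[2]?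
              = some ((N - 1) * N + (N - 1 - PySem.Int.mod clueIx N), -N) from rfl, Option.getD_some]
        rw [PySem.List.pyRange_one_cons (show (1:Int) < N + 1 by omega),
            PySem.List.pyRange_one_cons (show (1:Int) + 1 < N + 1 by omega),
            PySem.List.pyRange_one_cons (show (1:Int) + 1 + 1 < N + 1 by omega)]
        simp only [getCellIxLoopA]
        rw [if_neg (show ¬clueIx < N * 1 by omega),
            if_neg (show ¬clueIx < N * (1 + 1) by omega),
            if_pos (show clueIx < N * (1 + 1 + 1) by omega),
            if_neg (show ¬(1:Int) + 1 + 1 = 1 by omega),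
            if_neg (show ¬(1:Int) + 1 + 1 = 2 by omega), if_pos (by trivial)]
        rw [PySem.List.slice?_none_none_neg_one, Option.getD_some]
        simp only [getCellIxFromColIx, habs]
        exact rev_map_pyRange N _ _ (by intro x hx0 hxN; ring)
      · -- left edge, some i ≥ 4 / e = 3; here N ≥ 4
        have hN4 : 4 ≤ N := by nlinarith
        have hq : 3 ≤ PySem.Int.floordiv clueIx N :=
          (PySem.Int.le_floordiv_iff_mul_le hN0).mpr (by omega)
        have he : max 0 (min 3 (PySem.Int.floordiv clueIx N)) = ((3:Nat):Int) := by push_cast; omega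
        rw [he, PySem.List.pyGet?_natCast,
            show ([(PySem.Int.mod clueIx N, N), (PySem.Int.mod clueIx N * N + N - 1, -1),
                  ((N - 1) * N + (N - 1 - PySem.Int.mod clueIx N), -N),
                  ((N - 1 - PySem.Int.mod clueIx N) * N, 1)] : List (Int × Int))[3]?
              = some ((N - 1 - PySem.Int.mod clueIx N) * N, 1) from rfl, Option.getD_some]
        rw [PySem.List.pyRange_one_cons (show (1:Int) < N + 1 by omega),
            PySem.List.pyRange_one_cons (show (1:Int) + 1 < N + 1 by omega),
            PySem.List.pyRange_one_cons (show (1:Int) + 1 + 1 < N + 1 by omega)]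
        simp only [getCellIxLoopA]
        rw [if_neg (show ¬clueIx < N * 1 by omega),
            if_neg (show ¬clueIx < N * (1 + 1) by omega),
            if_neg (show ¬clueIx < N * (1 + 1 + 1) by omega)]
        have e4 : (1:Int) + 1 + 1 + 1 = 4 := by norm_num
        rw [e4, loopLeft clueIx N (N - 4).toNat 4 (by omega) hN4 (by omega) hlt rfl]
        simp only [getCellIxFromRowIx, habs, List.map_id']
        rw [pyRange_shift ((N - 1 - PySem.Int.mod clueIx N) * N) N]
        apply List.map_congr_left
        intro k _
        ring
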